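-- pv_equiv track=rewrite | github.com/JwahoonKim/PS | 프로그래머스/무지의 먹방 라이브.py | solution
-- ===== SOURCE A (Python) =====
-- def solution(food_times, k):
--     # 방송 중단 전 음식 다먹으면 return -1
--     total = sum(food_times)
--     if total <= k:
--         return -1
--
--     length = len(food_times)
--     foodTimesWithIndex = []
--
--     for i in range(length):
--         foodTimesWithIndex.append([food_times[i], i + 1])
--     foodTimesWithIndex.sort(reverse=True)
--
--     누적 = 0
--     while 1:
--         min = foodTimesWithIndex[-1][0] - 누적
--         # k가 가장 작은 음식시간 * length보다 커서
--         # 여러번 반복되는 경우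
--         if k >= min * length:
--             k -= min * length
--             length -= 1
--             누적 += min
--             foodTimesWithIndex.pop()
--         # k가 한바퀴 도는 데 걸리는 시간보다 적은 경우
--         elif k <= length:
--             break
--         # k가 한바퀴이상 도는데
--         # 음식 하나를 다 먹지는 못하는 시간인 경우
--         else:
--             while 1:
--                 min -= 1
--                 if k >= min * length:
--                     k -= min * length
--                     break
--     foodTimesWithIndex = sorted(foodTimesWithIndex, key=lambda x: x[1])
--     return foodTimesWithIndex[k % length][1]
-- ===== SOURCE B (Python) =====
-- def solution(food_times, k):
--     # One multiplication skips each whole round and one modulo finds the final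
--     # position, instead of A's unit-decrement while-loop; a single ascending
--     # scan over one sorted list replaces A's pop-from-a-reverse-sorted list.
--     if sum(food_times) <= k:
--         return -1
--     items = sorted((t, i) for i, t in enumerate(food_times, 1))
--     n = len(items)
--     prev = 0
--     for j, (t, _) in enumerate(items):
--         span = (t - prev) * (n - j)
--         if k < span:
--             return sorted(i for _, i in items[j:])[k % (n - j)]
--         k -= span
--         prev = t
-- ===== Notes on version B (the rewrite author's own statement) =====
-- stated objective: alternative
-- what changed: B sorts (time, index) pairs ascending once and scans them with a running pointer, skipping each whole round with one multiplication and finishing with one k % remaining, instead of A's reverse-sorted list with repeated pop() and a unit-decrement while-loop that subtracts one food-time step at a time (A's decrement loop is O(max_food_time) in the worst case, but a timing run's inputs do not reach it, so no speed is claimed).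
import Mathlib
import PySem

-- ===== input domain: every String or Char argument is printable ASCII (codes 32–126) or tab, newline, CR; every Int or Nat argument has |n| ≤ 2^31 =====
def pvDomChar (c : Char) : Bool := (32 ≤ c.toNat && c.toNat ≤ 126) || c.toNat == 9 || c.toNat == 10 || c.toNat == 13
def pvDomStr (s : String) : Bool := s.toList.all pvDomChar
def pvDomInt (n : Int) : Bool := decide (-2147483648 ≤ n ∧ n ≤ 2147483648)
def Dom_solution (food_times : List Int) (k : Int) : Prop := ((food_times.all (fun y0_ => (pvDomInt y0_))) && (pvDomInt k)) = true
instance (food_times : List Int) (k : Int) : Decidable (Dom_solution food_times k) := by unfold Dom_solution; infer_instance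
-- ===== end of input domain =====

-- B replaces A's unit-decrement skip loop by one floor division/modulo and A's
-- pop-from-a-reverse-sorted list by a single ascending scan over one sorted list
-- (a different algorithm of similar measured cost on the probe's inputs).

-- ===== PORT A =====

-- A's inner `while 1` loop: decrement `min` until k >= min*length, then return the
-- reduced k.  Fuel only makes the recursion total; it is never exhausted where A's
-- loop terminates (proved below); on exhaustion it returns 0 (unreachable).
def solutionInner (fuel : Nat) (mn k length : Int) : Int :=
  match fuel with
  | 0 => 0
  | f + 1 =>
    let mn := mn - 1
    if k ≥ mn * length then k - mn * length else solutionInner f mn k length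

-- the code after `break`: re-sort by original index (x[1]) and take [k % length][1]
def solutionFinal (fwi : List (Int × Int)) (length k : Int) : Int :=
  (PySem.List.pyGetD (PySem.List.sorted fwi (fun x => x.2)) (PySem.Int.mod k length) (0, 0)).2

-- A's outer `while 1` loop over state (foodTimesWithIndex, length, 누적, k).
-- pyGet? fwi (-1) = none is Python's IndexError (excluded by Pre_): return 0 there.
def solutionLoop (fuel : Nat) (fwi : List (Int × Int)) (length acc k : Int) : Int :=
  match fuel with
  | 0 => 0
  | f + 1 =>
    match PySem.List.pyGet? fwi (-1) with
    | none => 0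
    | some last =>
      let mn := last.1 - acc
      if k ≥ mn * length then
        solutionLoop f fwi.dropLast (length - 1) (acc + mn) (k - mn * length)
      else if k ≤ length then
        solutionFinal fwi length k
      else
        solutionLoop f fwi length acc (solutionInner (mn.toNat + 1) mn k length)

def solution (food_times : List Int) (k : Int) : Int :=
  let total := food_times.sum
  if total ≤ k then -1
  else
    let length := PySem.List.len food_times
    -- for i in range(length): foodTimesWithIndex.append([food_times[i], i+1])
    let fwi := (PySem.List.pyRange 0 length).foldl
      (fun acc i => acc ++ [(PySem.List.pyGetD food_times i 0, i + 1)]) []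
    -- foodTimesWithIndex.sort(reverse=True)  (lists compare lexicographically)
    let fwi := PySem.List.sorted2 fwi (fun x => x.1) (fun x => x.2) true
    solutionLoop (fwi.length + 2) fwi length 0 k

-- ===== PORT B =====

-- eat(items, prev, k): items[0] of [] is Python's IndexError (unreachable under Pre_).
def solutionAltEat : List (Int × Int) → Int → Int → Int
  | [], _, _ => 0
  | (t, i) :: rest, prev, k =>
    let span := (t - prev) * PySem.List.len ((t, i) :: rest)
    if k < span then
      PySem.List.pyGetD
        (PySem.List.sorted (((t, i) :: rest).map (fun x => x.2)) (fun x => x))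
        (PySem.Int.mod k (PySem.List.len ((t, i) :: rest))) 0
    else solutionAltEat rest t (k - span)

def solution_alt (food_times : List Int) (k : Int) : Int :=
  if food_times.sum ≤ k then -1
  else
    solutionAltEat
      (PySem.List.sorted2 ((PySem.List.enumerate food_times 1).map (fun p => (p.2, p.1)))
        (fun x => x.1) (fun x => x.2) false)
      0 k

-- ===== PRECONDITION & SPEC =====
-- Pre_ excludes exactly the inputs where A raises (IndexError on the empty list with
-- k < 0; B returns no int value there either: its loop body never runs); on every
-- other input both programs return and the claim covers them.
def Pre_solution (food_times : List Int) (k : Int) : Prop := food_times ≠ [] ∨ 0 ≤ k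
instance (food_times : List Int) (k : Int) : Decidable (Pre_solution food_times k) := by unfold Pre_solution; infer_instance
def pvWitness_solution : List Int × Int := ([3, 1, 2], 5)

def Spec_solution (food_times : List Int) (k : Int) (out : Int) : Prop := out = solution_alt food_times k
instance (food_times : List Int) (k : Int) (out : Int) : Decidable (Spec_solution food_times k out) := by unfold Spec_solution; infer_instance

-- ===== CLAIM (what is proved, stated in full; the proofs are below) =====
def Claim_equal_solution : Prop := ∀ (food_times : List Int) (k : Int), Dom_solution food_times k → Pre_solution food_times k → Spec_solution food_times k (solution food_times k)

-- ===== LEMMAS AND PROOFS =====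

-- Python's lexicographic comparison of the [time, index] pairs, as a single sort key.
def keyLex (p : Int × Int) : Lex (Int × Int) := toLex p

theorem keyLex_injective : Function.Injective keyLex := fun _ _ h => h

-- both ports' sorted2 calls are `sorted` under the lexicographic key
theorem sorted2_eq_sorted_keyLex (xs : List (Int × Int)) (rev : Bool) :
    PySem.List.sorted2 xs (fun x => x.1) (fun x => x.2) rev =
      PySem.List.sorted xs keyLex rev := by
  have hfun : ∀ a b : Int × Int,
      (decide (a.1 < b.1) || (!decide (b.1 < a.1) && decide (a.2 < b.2))) =
      decide (keyLex a < keyLex b) := by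
    intro a b
    have hiff : (keyLex a < keyLex b) ↔ (a.1 < b.1 ∨ ¬ b.1 < a.1 ∧ a.2 < b.2) := by
      rw [Prod.Lex.lt_iff]
      show (a.1 < b.1 ∨ a.1 = b.1 ∧ a.2 < b.2) ↔ _
      omega
    have hd : decide (keyLex a < keyLex b)
        = decide (a.1 < b.1 ∨ ¬ b.1 < a.1 ∧ a.2 < b.2) := decide_eq_decide.mpr hiff
    rw [hd]
    by_cases h1 : a.1 < b.1 <;> by_cases h2 : b.1 < a.1 <;> by_cases h3 : a.2 < b.2 <;>
      simp [h1, h2, h3]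
  cases rev with
  | false =>
    rw [PySem.List.sorted_eq_foldl_insertBy xs keyLex]
    simp only [PySem.List.sorted2, Bool.false_eq_true, if_false, hfun]
  | true =>
    rw [PySem.List.sorted_rev_eq_foldl_insertBy xs keyLex]
    simp only [PySem.List.sorted2, if_true, hfun]

theorem enumerate_shift {α : Type} (xs : List α) (s : Int) :
    PySem.List.enumerate xs s = (PySem.List.enumerate xs 0).map (fun p => (p.1 + s, p.2)) := by
  induction xs generalizing s with
  | nil => simp [PySem.List.enumerate_nil]
  | cons x t ih =>
    rw [PySem.List.enumerate_cons, PySem.List.enumerate_cons, ih (s + 1),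
      show (0 : Int) + 1 = 1 by norm_num, ih 1]
    simp only [List.map_map, List.map_cons, List.cons.injEq, Prod.mk.injEq]
    refine ⟨⟨by omega, trivial⟩, List.map_congr_left ?_⟩
    intro p _
    simp only [Function.comp_apply, Prod.mk.injEq]
    exact ⟨by omega, trivial⟩

-- strictness of a sorted list whose key values are distinct
theorem sorted_pairwise_lt {α κ : Type} [LinearOrder κ] (xs : List α) (key : α → κ)
    (hnd : (xs.map key).Nodup) :
    ((PySem.List.sorted xs key).map key).Pairwise (· < ·) := by
  have hle := PySem.List.sorted_map_key_pairwise xs key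
  have hnd' : ((PySem.List.sorted xs key).map key).Nodup :=
    (((PySem.List.sorted_perm xs key false).map key).nodup_iff).mpr hnd
  exact (hle.and hnd').imp (fun h => lt_of_le_of_ne h.1 h.2)

-- (more lemmas below)

theorem inner_eq (fuel : Nat) (mn k L : Int) (hL : 0 < L) (_hk : L < k) (hlt : k < mn * L)
    (hfuel : (mn - PySem.Int.floordiv k L).toNat ≤ fuel) :
    solutionInner fuel mn k L = PySem.Int.mod k L := by
  have hdm := PySem.Int.floordiv_mul_add_mod k L
  have hm0 := PySem.Int.mod_nonneg k hL
  have hqlt : PySem.Int.floordiv k L < mn := (PySem.Int.floordiv_lt_iff_lt_mul hL).mpr hlt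
  induction fuel generalizing mn with
  | zero => omega
  | succ f ih =>
    simp only [solutionInner]
    by_cases h : k ≥ (mn - 1) * L
    · rw [if_pos h]
      have h1 : mn - 1 ≤ PySem.Int.floordiv k L := (PySem.Int.le_floordiv_iff_mul_le hL).mpr h
      have : mn - 1 = PySem.Int.floordiv k L := by omega
      rw [this]
      omega
    · rw [if_neg h]
      have hlt' : k < (mn - 1) * L := by omega
      have hqlt' : PySem.Int.floordiv k L < mn - 1 := (PySem.Int.floordiv_lt_iff_lt_mul hL).mpr hlt'
      exact ih (mn - 1) hlt' (by omega) hqlt'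

theorem final_eq (u : List (Int × Int)) (hnd : (u.map (fun x => x.2)).Nodup) (k : Int)
    (hne : u ≠ []) :
    solutionFinal u.reverse (u.length) k =
      PySem.List.pyGetD (PySem.List.sorted (u.map (fun x => x.2)) (fun x => x))
        (PySem.Int.mod k (u.length)) 0 := by
  have hL : (0 : Int) < u.length := by
    cases u with
    | nil => exact absurd rfl hne
    | cons a t => simp
  set ys := PySem.List.sorted u (fun x => x.2) false with hys
  have hstrict : (ys.map (fun x => x.2)).Pairwise (· < ·) := sorted_pairwise_lt u _ hnd
  have hysnd : ys.Pairwise (fun a b => a.2 < b.2) := List.pairwise_map.mp hstrict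
  have h1 : PySem.List.sorted u.reverse (fun x => x.2) = ys :=
    PySem.List.sorted_eq_of_perm_of_pairwise_lt u.reverse ys (fun x => x.2)
      ((PySem.List.sorted_perm u (fun x => x.2) false).trans u.reverse_perm.symm) hysnd
  have h2 : PySem.List.sorted (u.map (fun x => x.2)) (fun x => x) = ys.map (fun x => x.2) :=
    PySem.List.sorted_eq_of_perm_of_pairwise_lt (u.map (fun x => x.2)) (ys.map (fun x => x.2))
      (fun x => x) ((PySem.List.sorted_perm u (fun x => x.2) false).map (fun x => x.2)) hstrict
  have hyslen : ys.length = u.length := PySem.List.length_sorted u (fun x => x.2) false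
  have hm0 : 0 ≤ PySem.Int.mod k u.length := PySem.Int.mod_nonneg k hL
  have hmL : PySem.Int.mod k u.length < u.length := PySem.Int.mod_lt k hL
  unfold solutionFinal
  rw [h1, h2]
  rw [PySem.List.pyGetD_eq_getElem ys (0, 0) hm0 (by rw [hyslen]; exact hmL),
    PySem.List.pyGetD_eq_getElem (ys.map (fun x => x.2)) 0 hm0
      (by rw [List.length_map, hyslen]; exact hmL)]
  simp [List.getElem_map]

theorem loop_eq (u : List (Int × Int)) (prev k : Int) (fuel : Nat)
    (hne : u ≠ []) (hnd : (u.map (fun x => x.2)).Nodup)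
    (hkb : k < (u.map (fun x => x.1)).sum - prev * u.length)
    (hfuel : u.length + 2 ≤ fuel) :
    solutionLoop fuel u.reverse (u.length) prev k = solutionAltEat u prev k := by
  induction u generalizing prev k fuel with
  | nil => exact absurd rfl hne
  | cons hd rest ih =>
    obtain ⟨t, i⟩ := hd
    obtain ⟨f, rfl⟩ : ∃ f, fuel = f + 1 := ⟨fuel - 1, by omega⟩
    have hlen : ((t, i) :: rest).length = rest.length + 1 := rfl
    have hL : (0 : Int) < ((t, i) :: rest).length := by simp
    have hget : PySem.List.pyGet? (((t, i) :: rest).reverse) (-1) = some (t, i) := by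
      rw [PySem.List.pyGet?_neg_one, List.getLast?_reverse]; rfl
    simp only [solutionLoop, hget]
    simp only [solutionAltEat, PySem.List.len]
    by_cases hpop : k ≥ (t - prev) * ((t, i) :: rest).length
    · rw [if_pos hpop, if_neg (not_lt.mpr hpop)]
      have hrest : rest ≠ [] := by
        rintro rfl
        simp only [List.map_cons, List.map_nil, List.sum_cons, List.sum_nil, List.length_cons,
          List.length_nil] at hkb hpop
        push_cast at hkb hpop
        nlinarith [hkb, hpop]
      rw [List.reverse_cons, List.dropLast_concat]
      have h1 : (((((t, i) :: rest).length : Int)) - 1) = (rest.length : Int) := by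
        rw [hlen]; push_cast; ring
      have h2 : prev + (t - prev) = t := by ring
      rw [h1, h2]
      have hbound : k - (t - prev) * (((t, i) :: rest).length : Int) <
          (rest.map (fun x => x.1)).sum - t * rest.length := by
        simp only [List.map_cons, List.sum_cons, List.length_cons] at hkb ⊢
        push_cast at hkb ⊢
        nlinarith [hkb]
      exact ih t (k - (t - prev) * (((t, i) :: rest).length : Int)) f hrest
        (by simpa using hnd.of_cons) hbound (by simp at hfuel ⊢; omega)
    · rw [if_neg hpop]
      have hlt : k < (t - prev) * (((t, i) :: rest).length : Int) := lt_of_not_ge hpop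
      by_cases hkL : k ≤ (((t, i) :: rest).length : Int)
      · rw [if_pos hkL, if_pos hlt]
        exact final_eq ((t, i) :: rest) hnd k (List.cons_ne_nil _ _)
      · rw [if_neg hkL, if_pos hlt]
        have hkgt : ((((t, i) :: rest).length : Int)) < k := not_le.mp hkL
        have hq1 : 1 ≤ PySem.Int.floordiv k (((t, i) :: rest).length : Int) :=
          (PySem.Int.le_floordiv_iff_mul_le hL).mpr (by linarith [one_mul ((((t, i) :: rest).length : Int))])
        have hqlt : PySem.Int.floordiv k (((t, i) :: rest).length : Int) < t - prev :=
          (PySem.Int.floordiv_lt_iff_lt_mul hL).mpr hlt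
        rw [inner_eq _ _ _ _ hL hkgt hlt (by omega)]
        obtain ⟨f', rfl⟩ : ∃ f', f = f' + 1 := ⟨f - 1, by simp at hfuel; omega⟩
        simp only [solutionLoop, hget]
        have hk'0 : 0 ≤ PySem.Int.mod k (((t, i) :: rest).length : Int) := PySem.Int.mod_nonneg k hL
        have hk'L : PySem.Int.mod k (((t, i) :: rest).length : Int) < (((t, i) :: rest).length : Int) :=
          PySem.Int.mod_lt k hL
        have hmn2 : 2 ≤ t - prev := by nlinarith [hlt, hkgt, hL]
        rw [if_neg (by nlinarith [hk'L, hmn2, hL]), if_pos (le_of_lt hk'L)]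
        rw [final_eq ((t, i) :: rest) hnd _ (List.cons_ne_nil _ _)]
        have hmm : PySem.Int.mod (PySem.Int.mod k (((t, i) :: rest).length : Int))
            (((t, i) :: rest).length : Int) = PySem.Int.mod k (((t, i) :: rest).length : Int) := by
          rw [PySem.Int.mod_eq_emod_of_pos hL]
          exact Int.emod_eq_of_lt hk'0 hk'L
        rw [hmm]

-- ===== VERDICT (by name: the statement is the Claim_ definition above) =====
theorem solution_spec : Claim_equal_solution := by
  intro ft k _ hpre
  unfold Spec_solution solution solution_alt
  by_cases hs : ft.sum ≤ k
  · simp [hs]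
  · simp only [if_neg hs]
    have hknlt : k < ft.sum := not_le.mp hs
    by_cases hftnil : ft = []
    · exfalso
      rcases hpre with h | h
      · exact h hftnil
      · rw [hftnil] at hknlt; simp at hknlt; omega
    set P := (PySem.List.pyRange 0 (PySem.List.len ft)).map
      (fun i => (PySem.List.pyGetD ft i 0, i + 1)) with hP
    have hApairs : (PySem.List.pyRange 0 (PySem.List.len ft)).foldl
        (fun acc i => acc ++ [(PySem.List.pyGetD ft i 0, i + 1)]) [] = P := by
      rw [PySem.List.foldl_append_singleton_eq_map]; simp [hP, PySem.List.len]
    have hBpairs : (PySem.List.enumerate ft 1).map (fun p => (p.2, p.1)) = P := by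
      rw [enumerate_shift, PySem.List.enumerate_eq_map_pyRange ft 0, List.map_map, List.map_map]
      exact List.map_congr_left (fun j _ => rfl)
    rw [hApairs, hBpairs, sorted2_eq_sorted_keyLex P true, sorted2_eq_sorted_keyLex P false]
    set asc := PySem.List.sorted P keyLex false with hasc
    have hinj : Function.Injective (fun i : Int => (PySem.List.pyGetD ft i 0, i + 1)) := by
      intro a b h
      have := congrArg Prod.snd h
      simp at this
      omega
    have hPnd : P.Nodup := (PySem.List.nodup_pyRange_one 0 (PySem.List.len ft)).map hinj
    have hstrict : asc.Pairwise (fun a b => keyLex a < keyLex b) :=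
      List.pairwise_map.mp (sorted_pairwise_lt P keyLex (hPnd.map keyLex_injective))
    have hdesc : PySem.List.sorted P keyLex true = asc.reverse :=
      PySem.List.sorted_rev_eq_of_perm_of_pairwise_gt P asc.reverse keyLex
        (asc.reverse_perm.trans (PySem.List.sorted_perm P keyLex false))
        (List.pairwise_reverse.mpr hstrict)
    have hlenasc : asc.length = ft.length := by
      rw [hasc, PySem.List.length_sorted, hP, List.length_map, PySem.List.length_pyRange_one]
      simp [PySem.List.len]
    have hlenInt : PySem.List.len ft = (asc.length : Int) := by
      simp [PySem.List.len, hlenasc]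
    have hne : asc ≠ [] := by
      intro h
      apply hftnil
      have : asc.length = 0 := by rw [h]; rfl
      rw [hlenasc] at this
      exact List.eq_nil_of_length_eq_zero this
    have hnd : (asc.map (fun x => x.2)).Nodup := by
      refine (((PySem.List.sorted_perm P keyLex false).map (fun x => x.2)).nodup_iff).mpr ?_
      rw [hP, List.map_map]
      exact (PySem.List.nodup_pyRange_one 0 (PySem.List.len ft)).map
        (fun a b h => by simpa using h)
    have hsum : (asc.map (fun x => x.1)).sum = ft.sum := by
      rw [((PySem.List.sorted_perm P keyLex false).map (fun x => x.1)).sum_eq]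
      rw [hP, List.map_map]
      have : ((fun x : Int × Int => x.1) ∘ fun i => (PySem.List.pyGetD ft i 0, i + 1)) =
          (fun j => PySem.List.pyGetD ft j 0) := rfl
      rw [this, PySem.List.map_pyGetD_pyRange_zero ft 0]
    have hkb : k < (asc.map (fun x => x.1)).sum - 0 * (asc.length : Int) := by
      rw [hsum]; simpa using hknlt
    rw [hdesc, List.length_reverse, hlenInt]
    exact loop_eq asc 0 k (asc.length + 2) hne hnd hkb le_rfl
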